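-- pv_equiv track=rewrite | github.com/aojielian/molecular-autism-retained-core | Build_Supplementary_MasterWorkbook_v4.py | extract_id_set
-- ===== SOURCE A (Python) =====
-- from typing import List, Dict, Optional, Iterable, Set
--
-- def normalize_str(x):
--     if x is None:
--         return ''
--     return str(x).strip()
--
-- def unique_values(rows: List[Dict[str, str]], candidates: List[str]) -> List[str]:
--     cols = set()
--     for r in rows:
--         cols.update(r.keys())
--     return [c for c in candidates if c in cols]
--
-- def extract_id_set(rows: List[Dict[str, str]], candidates: List[str]) -> Set[str]:
--     out = set()
--     cols = unique_values(rows, candidates)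
--     if not cols:
--         return out
--     col = cols[0]
--     for r in rows:
--         v = normalize_str(r.get(col))
--         if v != '':
--             out.add(v)
--     return out
-- ===== SOURCE B (Python) =====
-- def normalize_str(x):
--     if x is None:
--         return ''
--     return str(x).strip()
--
-- def extract_id_set(rows, candidates):
--     # pick the first candidate column present in any row (short-circuit scan)
--     col = next((c for c in candidates if any(c in r for r in rows)), None)
--     out = set()
--     if col is None:
--         return out
--     for r in rows:
--         v = normalize_str(r.get(col))
--         if v != '':
--             out.add(v)
--     return out
-- ===== Notes on version B (the rewrite author's own statement) =====
-- stated objective: simpler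
-- what changed: B drops unique_values entirely: instead of building the union set of all keys across rows and then filtering candidates against it, B scans candidates in order and picks the first one present in any row (short-circuit), then does the single collecting pass.
import Mathlib
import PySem

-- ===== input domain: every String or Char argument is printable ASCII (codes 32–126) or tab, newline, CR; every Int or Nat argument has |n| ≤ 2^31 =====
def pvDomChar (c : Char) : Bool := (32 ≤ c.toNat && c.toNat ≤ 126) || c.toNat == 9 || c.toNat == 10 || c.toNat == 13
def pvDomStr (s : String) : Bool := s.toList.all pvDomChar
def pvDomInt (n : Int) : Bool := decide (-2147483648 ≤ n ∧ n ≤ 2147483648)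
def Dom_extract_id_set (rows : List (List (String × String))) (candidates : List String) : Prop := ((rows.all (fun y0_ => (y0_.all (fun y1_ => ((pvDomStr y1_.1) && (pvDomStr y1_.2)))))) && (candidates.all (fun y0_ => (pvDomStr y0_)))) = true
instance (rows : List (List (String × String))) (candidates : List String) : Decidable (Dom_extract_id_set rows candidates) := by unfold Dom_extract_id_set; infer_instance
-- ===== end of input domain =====

-- B inlines unique_values: it picks the first candidate present in any row by a
-- short-circuit scan instead of building the union of all rows' keys and filtering.

-- ===== PORT A =====
-- normalize_str(x): '' on None, else str(x).strip() (values here are strings)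
def pvNormalize (o : Option String) : String :=
  match o with
  | none => ""
  | some s => PySem.Str.strip s

def unique_values (rows : List (List (String × String))) (candidates : List String) : List String :=
  let cols := rows.foldl (fun s r => PySem.Set.update s (PySem.Dict.keys (PySem.Dict.mk r))) PySem.Set.empty
  candidates.filter (fun c => PySem.Set.contains cols c)

def extract_id_set (rows : List (List (String × String))) (candidates : List String) : List String :=
  match unique_values rows candidates with
  | [] => PySem.Set.empty
  | col :: _ =>
      rows.foldl (fun out r =>
        let v := pvNormalize ((PySem.Dict.mk r).get? col)
        if v ≠ "" then PySem.Set.add out v else out) PySem.Set.empty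

-- ===== PORT B =====
-- the single collecting pass of B's for-loop, as structural recursion
def pvCollect (rows : List (List (String × String))) (col : String) (out : PySem.Set String) : PySem.Set String :=
  match rows with
  | [] => out
  | r :: rest =>
      let v := pvNormalize ((PySem.Dict.mk r).get? col)
      pvCollect rest col (if v ≠ "" then PySem.Set.add out v else out)

def extract_id_set_alt (rows : List (List (String × String))) (candidates : List String) : List String :=
  match candidates.find? (fun c => rows.any (fun r => PySem.Dict.contains (PySem.Dict.mk r) c)) with
  | none => PySem.Set.empty
  | some col => pvCollect rows col PySem.Set.empty

-- ===== PRECONDITION & SPEC =====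
def Spec_extract_id_set (rows : List (List (String × String))) (candidates : List String) (out : List String) : Prop := out = extract_id_set_alt rows candidates
instance (rows : List (List (String × String))) (candidates : List String) (out : List String) : Decidable (Spec_extract_id_set rows candidates out) := by unfold Spec_extract_id_set; infer_instance

-- ===== CLAIM (what is proved, stated in full; the proofs are below) =====
def Claim_equal_extract_id_set : Prop := ∀ (rows : List (List (String × String))) (candidates : List String), Dom_extract_id_set rows candidates → Spec_extract_id_set rows candidates (extract_id_set rows candidates)

-- ===== LEMMAS AND PROOFS =====

-- membership in A's key-union fold = "some row contains the key"
theorem pv_mem_fold_update (rows : List (List (String × String))) (s : PySem.Set String) (c : String) :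
    (c ∈ rows.foldl (fun s r => PySem.Set.update s (PySem.Dict.keys (PySem.Dict.mk r))) s)
      ↔ (c ∈ s ∨ rows.any (fun r => PySem.Dict.contains (PySem.Dict.mk r) c) = true) := by
  induction rows generalizing s with
  | nil => simp
  | cons r rest ih =>
      simp only [List.foldl_cons, List.any_cons, ih, PySem.Set.mem_update, Bool.or_eq_true,
        PySem.Dict.contains_iff_mem_keys]
      tauto

-- A's candidate filter agrees pointwise with B's per-candidate test
theorem pv_test_eq (rows : List (List (String × String))) (c : String) :
    PySem.Set.contains
        (rows.foldl (fun s r => PySem.Set.update s (PySem.Dict.keys (PySem.Dict.mk r))) PySem.Set.empty) c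
      = rows.any (fun r => PySem.Dict.contains (PySem.Dict.mk r) c) := by
  rcases h : rows.any (fun r => PySem.Dict.contains (PySem.Dict.mk r) c) with _ | _
  · rcases hc : PySem.Set.contains
        (rows.foldl (fun s r => PySem.Set.update s (PySem.Dict.keys (PySem.Dict.mk r))) PySem.Set.empty) c with _ | _
    · rfl
    · exfalso
      rw [PySem.Set.contains_iff, pv_mem_fold_update] at hc
      simp [PySem.Set.empty] at hc
      simp only [List.any_eq_false] at h
      simp only [PySem.Dict.contains_iff_mem_keys] at h hc
      obtain ⟨r, hr, hk⟩ := hc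
      have := h r hr
      simp at this hk
      obtain ⟨v, hv⟩ := hk
      exact this v hv
  · rw [PySem.Set.contains_iff, pv_mem_fold_update]
    exact Or.inr h

-- head of a filter = find?
theorem pv_head_filter {α : Type} (p : α → Bool) (l : List α) :
    (l.filter p).head? = l.find? p := by
  induction l with
  | nil => rfl
  | cons a t ih =>
      by_cases h : p a = true
      · simp [h]
      · simp only [Bool.not_eq_true] at h
        simp [h, ih]

-- B's recursion is A's collecting fold
theorem pv_collect_eq_foldl (rows : List (List (String × String))) (col : String) (out : PySem.Set String) :
    pvCollect rows col out
      = rows.foldl (fun out r =>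
          let v := pvNormalize ((PySem.Dict.mk r).get? col)
          if v ≠ "" then PySem.Set.add out v else out) out := by
  induction rows generalizing out with
  | nil => rfl
  | cons r rest ih => simp [pvCollect, ih]

-- ===== VERDICT (by name: the statement is the Claim_ definition above) =====
theorem extract_id_set_spec : Claim_equal_extract_id_set := by
  intro rows candidates _
  unfold Spec_extract_id_set extract_id_set extract_id_set_alt unique_values
  have hfind :
      (candidates.filter (fun c =>
          PySem.Set.contains
            (rows.foldl (fun s r => PySem.Set.update s (PySem.Dict.keys (PySem.Dict.mk r))) PySem.Set.empty) c)).head?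
        = candidates.find? (fun c => rows.any (fun r => PySem.Dict.contains (PySem.Dict.mk r) c)) := by
    rw [pv_head_filter]
    have : (fun c => PySem.Set.contains
        (rows.foldl (fun s r => PySem.Set.update s (PySem.Dict.keys (PySem.Dict.mk r))) PySem.Set.empty) c)
        = (fun c => rows.any (fun r => PySem.Dict.contains (PySem.Dict.mk r) c)) :=
      funext (fun c => pv_test_eq rows c)
    rw [this]
  cases hres : candidates.filter (fun c =>
      PySem.Set.contains
        (rows.foldl (fun s r => PySem.Set.update s (PySem.Dict.keys (PySem.Dict.mk r))) PySem.Set.empty) c) with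
  | nil =>
      rw [hres] at hfind
      simp only [List.head?_nil] at hfind
      rw [← hfind]
  | cons col rest =>
      rw [hres] at hfind
      simp only [List.head?_cons] at hfind
      rw [← hfind]
      simp only [pv_collect_eq_foldl]
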